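-- pv_equiv track=rewrite | github.com/nccgroup/dotnetpaddingoracle | mtools.py | decify
-- ===== SOURCE A (Python) =====
-- def decify(val,printable = False):
-- 	if type(val) == type(""):
-- 		val = val.encode()
-- 	i = 0
-- 	c = 0
-- 	fi = ""
-- 	sep = " "
-- 	if printable:
-- 		sep = "\n"
-- 	while i < len(val):
-- 		if i != 0 and i % 16 == 0:
-- 			fi += sep
-- 		elif i != 0 and i % 8 == 0:
-- 			fi += " "
-- 		fi += "{0:03d} ".format(val[i])
-- 		i += 1
--
-- 	return fi
-- ===== SOURCE B (Python) =====
-- def decify(val, printable=False):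
--     if isinstance(val, str):
--         val = val.encode()
--     if not val:
--         return ""
--     sep = "\n" if printable else " "
--     groups = [val[k:k + 8] for k in range(0, len(val), 8)]
--     parts = []
--     for g, grp in enumerate(groups):
--         if g:
--             parts.append(sep if g % 2 == 0 else " ")
--         parts.append("".join("{0:03d} ".format(b) for b in grp))
--     return "".join(parts)
-- ===== Notes on version B (the rewrite author's own statement) =====
-- stated objective: faster
-- what changed: Replaces A's per-byte while loop with index modulus tests (i%16, i%8) and repeated string += by chunking the bytes into 8-byte groups, rendering each group with str.join and joining the collected parts once, inserting one separator per group (sep for even group numbers, ' ' for odd ones).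
import Mathlib
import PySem

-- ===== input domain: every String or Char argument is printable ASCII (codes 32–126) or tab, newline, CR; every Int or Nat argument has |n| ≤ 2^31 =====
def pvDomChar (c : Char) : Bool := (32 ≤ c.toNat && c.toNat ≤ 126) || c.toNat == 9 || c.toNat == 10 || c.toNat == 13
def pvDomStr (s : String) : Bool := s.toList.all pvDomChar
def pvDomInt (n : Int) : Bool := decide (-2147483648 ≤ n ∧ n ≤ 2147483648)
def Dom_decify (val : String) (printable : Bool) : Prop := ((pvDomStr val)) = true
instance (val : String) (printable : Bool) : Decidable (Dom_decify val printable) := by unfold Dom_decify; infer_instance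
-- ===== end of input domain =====

-- B groups the bytes in 8-byte chunks and emits each chunk's text with one inserted
-- separator per chunk, instead of A's per-byte index tests (objective: simpler decomposition).
-- val.encode() is ported as the char codes of val: exact on the ASCII domain Dom_decify.

-- "{0:03d} ".format(b): zero-pad to width 3, plus the trailing space (b is a byte, ≥ 0).
def fmt3 (n : Nat) : String :=
  (if n < 10 then "00" else if n < 100 then "0" else "") ++ PySem.Int.toStr (Int.ofNat n) ++ " "

-- ===== PORT A =====
-- the while loop of A: i is the index, fi the accumulator
def decifyLoopA (bs : List Nat) (i : Nat) (sep : String) (fi : String) : String :=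
  match bs with
  | [] => fi
  | b :: rest =>
      let fi := if i ≠ 0 ∧ i % 16 = 0 then fi ++ sep
                else if i ≠ 0 ∧ i % 8 = 0 then fi ++ " " else fi
      decifyLoopA rest (i + 1) sep (fi ++ fmt3 b)

def decify (val : String) (printable : Bool) : String :=
  decifyLoopA (val.toList.map (fun c => c.toNat)) 0 (if printable then "\n" else " ") ""

-- ===== PORT B =====
-- [val[k:k+8] for k in range(0, len(val), 8)]
def chunks8 : List Nat → List (List Nat)
  | [] => []
  | b :: rest => (b :: rest.take 7) :: chunks8 (rest.drop 7)
termination_by bs => bs.length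
decreasing_by simp

-- the enumerate loop of B: g is the group counter; parts are appended directly
def decifyGroupsB (gs : List (List Nat)) (g : Nat) (sep : String) : String :=
  match gs with
  | [] => ""
  | grp :: rest =>
      (if g = 0 then "" else if g % 2 = 0 then sep else " ")
        ++ String.join (grp.map fmt3) ++ decifyGroupsB rest (g + 1) sep

def decify_alt (val : String) (printable : Bool) : String :=
  if val.toList.map (fun c => c.toNat) = [] then ""
  else decifyGroupsB (chunks8 (val.toList.map (fun c => c.toNat))) 0
        (if printable then "\n" else " ")

-- ===== PRECONDITION & SPEC =====
def Spec_decify (val : String) (printable : Bool) (out : String) : Prop := out = decify_alt val printable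
instance (val : String) (printable : Bool) (out : String) : Decidable (Spec_decify val printable out) := by unfold Spec_decify; infer_instance

-- ===== CLAIM (what is proved, stated in full; the proofs are below) =====
def Claim_equal_decify : Prop := ∀ (val : String) (printable : Bool), Dom_decify val printable → Spec_decify val printable (decify val printable)

-- ===== LEMMAS AND PROOFS =====

theorem foldl_append_shift (l : List String) (a b : String) :
    List.foldl (fun r s => r ++ s) (a ++ b) l = a ++ List.foldl (fun r s => r ++ s) b l := by
  induction l generalizing b with
  | nil => rfl
  | cons x xs ih => simp only [List.foldl, String.append_assoc, ih]

theorem join_cons (s : String) (l : List String) :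
    String.join (s :: l) = s ++ String.join l := by
  show List.foldl (fun r t => r ++ t) ("" ++ s) l = s ++ List.foldl (fun r t => r ++ t) "" l
  rw [show ("" ++ s) = (s ++ "") by simp, foldl_append_shift]

-- reference rendering: per-byte concatenation with the index-dependent prefix
def prefIdx (i : Nat) (sep : String) : String :=
  if i ≠ 0 ∧ i % 16 = 0 then sep else if i ≠ 0 ∧ i % 8 = 0 then " " else ""

def concatEnum (bs : List Nat) (i : Nat) (sep : String) : String :=
  match bs with
  | [] => ""
  | b :: rest => prefIdx i sep ++ fmt3 b ++ concatEnum rest (i + 1) sep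

theorem loopA_eq (bs : List Nat) (i : Nat) (sep acc : String) :
    decifyLoopA bs i sep acc = acc ++ concatEnum bs i sep := by
  induction bs generalizing i acc with
  | nil => simp [decifyLoopA, concatEnum]
  | cons b rest ih =>
      simp only [decifyLoopA, concatEnum, prefIdx, ih]
      split_ifs <;> simp [String.append_assoc]

theorem concatEnum_append (xs ys : List Nat) (i : Nat) (sep : String) :
    concatEnum (xs ++ ys) i sep = concatEnum xs i sep ++ concatEnum ys (i + xs.length) sep := by
  induction xs generalizing i with
  | nil => simp [concatEnum]
  | cons x xs ih =>
      simp [concatEnum, ih, String.append_assoc, Nat.add_assoc, Nat.add_comm 1 xs.length]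

-- within a group (index i with i % 8 ≠ 0 and room to the next multiple of 8), no prefix appears
theorem concatEnum_inner (bs : List Nat) (i : Nat) (sep : String) (h8 : i % 8 ≠ 0)
    (hlen : bs.length ≤ 8 - i % 8) :
    concatEnum bs i sep = String.join (bs.map fmt3) := by
  induction bs generalizing i with
  | nil => simp [concatEnum, String.join]
  | cons b rest ih =>
      simp only [concatEnum, prefIdx, List.map, join_cons]
      rw [if_neg (by omega), if_neg (by omega)]
      rcases rest with _ | ⟨c, rest'⟩
      · simp [concatEnum, String.join]
      · simp only [List.length_cons] at hlen
        rw [ih (i + 1) (by omega) (by simp; omega)]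
        simp

theorem concatEnum_groups (n : Nat) (bs : List Nat) (g : Nat) (sep : String)
    (hn : bs.length ≤ n) :
    concatEnum bs (8 * g) sep = decifyGroupsB (chunks8 bs) g sep := by
  induction n generalizing bs g with
  | zero =>
      have : bs = [] := List.eq_nil_of_length_eq_zero (by omega)
      subst this
      simp [concatEnum, chunks8, decifyGroupsB]
  | succ n ih =>
      rcases bs with _ | ⟨b, rest⟩
      · simp [concatEnum, chunks8, decifyGroupsB]
      · have hpref : prefIdx (8 * g) sep
            = (if g = 0 then "" else if g % 2 = 0 then sep else " ") := by
          unfold prefIdx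
          rcases Nat.eq_zero_or_pos g with hg | hg
          · subst hg; simp
          · by_cases he : g % 2 = 0
            · rw [if_pos (by omega), if_neg (by omega), if_pos he]
            · rw [if_neg (by omega), if_pos (by omega), if_neg (by omega), if_neg he]
        have hsplit := concatEnum_append (rest.take 7) (rest.drop 7) (8 * g + 1) sep
        rw [List.take_append_drop] at hsplit
        rw [show chunks8 (b :: rest) = (b :: rest.take 7) :: chunks8 (rest.drop 7) from
              by simp [chunks8]]
        simp only [decifyGroupsB, concatEnum, hsplit, ← hpref, List.map, join_cons]
        rw [concatEnum_inner (rest.take 7) (8 * g + 1) sep (by omega) (by simp)]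
        rcases Nat.lt_or_ge rest.length 7 with hl | hl
        · have hd : rest.drop 7 = [] := List.drop_eq_nil_of_le (by omega)
          rw [hd]
          simp [concatEnum, chunks8, decifyGroupsB, String.append_assoc]
        · have hidx : 8 * g + 1 + (rest.take 7).length = 8 * (g + 1) := by
            simp [List.length_take]; omega
          rw [hidx, ih (rest.drop 7) (g + 1) (by simp at hn ⊢; omega)]
          simp [String.append_assoc]

-- ===== VERDICT (by name: the statement is the Claim_ definition above) =====
theorem decify_spec : Claim_equal_decify := by
  intro val printable _
  unfold Spec_decify decify decify_alt
  generalize (if printable then "\n" else " ") = sep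
  generalize val.toList.map (fun c => c.toNat) = bs
  rcases bs with _ | ⟨b, rest⟩
  · simp [decifyLoopA]
  · rw [if_neg (by simp), loopA_eq]
    have h2 := concatEnum_groups (b :: rest).length (b :: rest) 0 sep (le_refl _)
    rw [Nat.mul_zero] at h2
    simpa using h2
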